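-- pv_equiv track=rewrite | github.com/naguri17/NT2205 | week02-code/week2/week01_poly.py | _mat_det
-- ===== SOURCE A (Python) =====
-- from typing import List
--
-- def _mat_det(matrix: List[List[int]], mod: int) -> int:
--     # recursive determinant (small n expected)
--     n = len(matrix)
--     if n == 1:
--         return matrix[0][0] % mod
--     if n == 2:
--         return (matrix[0][0]*matrix[1][1] - matrix[0][1]*matrix[1][0]) % mod
--     det = 0
--     for c in range(n):
--         sign = -1 if (c % 2) else 1
--         # build minor
--         minor = [row[:c] + row[c+1:] for row in matrix[1:]]
--         det += sign * matrix[0][c] * _mat_det(minor, mod)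
--     return det % mod
-- ===== SOURCE B (Python) =====
-- from typing import List
--
-- def _mat_det(matrix: List[List[int]], mod: int) -> int:
--     # subset DP: det (mod `mod`) of the trailing k rows restricted to a column set,
--     # memoised over column tuples -- O(2^n * n^2) instead of the naive O(n!) expansion
--     n = len(matrix)
--     memo = {}
--     def det_cols(cols):
--         # determinant (mod `mod`) of rows n-len(cols)..n-1 on the columns `cols`
--         if not cols:
--             return 1 % mod
--         if cols in memo:
--             return memo[cols]
--         row = matrix[n - len(cols)]
--         acc = 0
--         sign = 1
--         for i in range(len(cols)):
--             acc += sign * row[cols[i]] * det_cols(cols[:i] + cols[i+1:])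
--             sign = -sign
--         memo[cols] = acc % mod
--         return memo[cols]
--     return det_cols(tuple(range(n)))
-- ===== Notes on version B (the rewrite author's own statement) =====
-- stated objective: faster
-- what changed: Replaces the naive recursive cofactor expansion (rebuilding minor matrices, O(n!)) by a dynamic program memoised over column subsets: det of the trailing k rows on a column tuple is computed once, giving O(2^n n^2).
-- intended difference: On the empty matrix (with mod not 1 or -1) A returns 0, but the determinant of the 0x0 matrix is 1, so B returns 1 % mod, the mathematically intended value. — e.g. on _mat_det([], 5): A returns 0, B returns 1
import Mathlib
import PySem

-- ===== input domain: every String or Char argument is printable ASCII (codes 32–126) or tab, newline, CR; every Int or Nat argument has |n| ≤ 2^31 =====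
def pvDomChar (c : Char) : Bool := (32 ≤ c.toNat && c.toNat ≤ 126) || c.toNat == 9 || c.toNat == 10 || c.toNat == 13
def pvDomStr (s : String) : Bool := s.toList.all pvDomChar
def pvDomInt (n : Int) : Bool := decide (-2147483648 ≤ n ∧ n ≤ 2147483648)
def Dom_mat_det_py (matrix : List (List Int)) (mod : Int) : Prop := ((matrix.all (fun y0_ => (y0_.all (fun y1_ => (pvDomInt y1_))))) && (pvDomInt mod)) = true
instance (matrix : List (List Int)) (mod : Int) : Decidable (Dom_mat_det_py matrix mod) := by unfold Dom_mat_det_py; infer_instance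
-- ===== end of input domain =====

-- B replaces A's O(n!) recursive cofactor expansion by a column-subset dynamic program
-- memoised over column tuples (O(2^n n^2)); measured faster. On the empty matrix A returns 0
-- where B returns 1 % mod, the determinant of the 0×0 matrix (stated as D_ below).

-- ===== PORT A =====
-- literal port of the recursive cofactor expansion; the n = 0 case (Python: the loop body
-- never runs and `0 % mod` is returned) is the `[]` branch of the match.
def mat_det_py (matrix : List (List Int)) (mod : Int) : Int :=
  match matrix with
  | [] => PySem.Int.mod 0 mod
  | r0 :: rest =>
    let n := rest.length + 1
    if n = 1 then
      PySem.Int.mod (r0.getD 0 0) mod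
    else if n = 2 then
      PySem.Int.mod (r0.getD 0 0 * (rest.getD 0 []).getD 1 0
        - r0.getD 1 0 * (rest.getD 0 []).getD 0 0) mod
    else
      let det := (List.range n).foldl (fun det c =>
        let sign : Int := if c % 2 = 1 then -1 else 1
        let minor := rest.map (fun row => row.take c ++ row.drop (c+1))
        det + sign * r0.getD c 0 * mat_det_py minor mod) 0
      PySem.Int.mod det mod
termination_by matrix.length
decreasing_by simp

-- ===== PORT B =====
-- port of Source B: det_cols / its inner for-loop (index i split as pre ++ post), threading the memo dict.
mutual
def matDetCols (matrix : List (List Int)) (n : Nat) (mod : Int)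
    (cols : List Nat) (memo : PySem.Dict (List Nat) Int) : Int × PySem.Dict (List Nat) Int :=
  if cols = [] then (PySem.Int.mod 1 mod, memo)
  else
    match memo.get? cols with
    | some v => (v, memo)
    | none =>
      let row := matrix.getD (n - cols.length) []
      let res := matDetLoop matrix n mod row [] cols 1 0 memo
      let r := PySem.Int.mod res.1 mod
      (r, res.2.insert cols r)
termination_by (cols.length, cols.length + 1)
decreasing_by simp; omega

def matDetLoop (matrix : List (List Int)) (n : Nat) (mod : Int) (row : List Int)
    (pre post : List Nat) (sign acc : Int) (memo : PySem.Dict (List Nat) Int) :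
    Int × PySem.Dict (List Nat) Int :=
  match post with
  | [] => (acc, memo)
  | c :: rest =>
    let vr := matDetCols matrix n mod (pre ++ rest) memo
    matDetLoop matrix n mod row (pre ++ [c]) rest (-sign)
      (acc + sign * row.getD c 0 * vr.1) vr.2
termination_by (pre.length + post.length, post.length)
decreasing_by
  · simp; omega
  · simp; omega
end

def mat_det_py_alt (matrix : List (List Int)) (mod : Int) : Int :=
  (matDetCols matrix matrix.length mod (List.range matrix.length) PySem.Dict.empty).1

-- ===== PRECONDITION & SPEC =====
-- Pre_ excludes exactly the inputs where A raises: mod = 0 (ZeroDivisionError) and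
-- matrices with a row shorter than the matrix (IndexError).
def Pre_mat_det_py (matrix : List (List Int)) (mod : Int) : Prop :=
  mod ≠ 0 ∧ ∀ row ∈ matrix, matrix.length ≤ row.length
instance (matrix : List (List Int)) (mod : Int) : Decidable (Pre_mat_det_py matrix mod) := by
  unfold Pre_mat_det_py; infer_instance

def pvWitness_mat_det_py : List (List Int) × Int := ([[1, 2], [3, 4]], 5)

-- On the empty matrix (mod ∉ {1, -1}) A returns 0, but the determinant of the 0×0 matrix
-- is 1, so B returns 1 % mod, the mathematically intended value.
def D_mat_det_py (matrix : List (List Int)) (mod : Int) : Prop :=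
  matrix = [] ∧ mod ≠ 1 ∧ mod ≠ -1
instance (matrix : List (List Int)) (mod : Int) : Decidable (D_mat_det_py matrix mod) := by
  unfold D_mat_det_py; infer_instance

def Spec_mat_det_py (matrix : List (List Int)) (mod : Int) (out : Int) : Prop :=
  ¬ D_mat_det_py matrix mod → out = mat_det_py_alt matrix mod
instance (matrix : List (List Int)) (mod : Int) (out : Int) : Decidable (Spec_mat_det_py matrix mod out) := by
  unfold Spec_mat_det_py; infer_instance

def pvDiffWitness_mat_det_py : List (List Int) × Int := ([], 5)
def pvDiffWitnessOut_mat_det_py : Int × Int := (0, 1)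

-- ===== CLAIM (what is proved, stated in full; the proofs are below) =====
def Claim_unchanged_mat_det_py : Prop := ∀ (matrix : List (List Int)) (mod : Int), Dom_mat_det_py matrix mod → Pre_mat_det_py matrix mod → Spec_mat_det_py matrix mod (mat_det_py matrix mod)
def Claim_changed_mat_det_py : Prop := Dom_mat_det_py (pvDiffWitness_mat_det_py.1) (pvDiffWitness_mat_det_py.2) ∧ Pre_mat_det_py (pvDiffWitness_mat_det_py.1) (pvDiffWitness_mat_det_py.2) ∧ D_mat_det_py (pvDiffWitness_mat_det_py.1) (pvDiffWitness_mat_det_py.2) ∧ mat_det_py (pvDiffWitness_mat_det_py.1) (pvDiffWitness_mat_det_py.2) = pvDiffWitnessOut_mat_det_py.1 ∧ mat_det_py_alt (pvDiffWitness_mat_det_py.1) (pvDiffWitness_mat_det_py.2) = pvDiffWitnessOut_mat_det_py.2 ∧ pvDiffWitnessOut_mat_det_py.1 ≠ pvDiffWitnessOut_mat_det_py.2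
def Claim_exact_mat_det_py : Prop := ∀ (matrix : List (List Int)) (mod : Int), Dom_mat_det_py matrix mod → Pre_mat_det_py matrix mod → D_mat_det_py matrix mod → mat_det_py matrix mod ≠ mat_det_py_alt matrix mod

-- ===== LEMMAS AND PROOFS =====

-- pure specification: fuel-indexed cofactor recursion, mod taken at every level
def matDetSF (matrix : List (List Int)) (mod : Int) (n : Nat) : Nat → List Nat → Int
  | _, [] => PySem.Int.mod 1 mod
  | 0, _ :: _ => 0
  | fuel+1, c0 :: rest =>
    PySem.Int.mod
      (((List.range (c0 :: rest).length).map (fun i =>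
        (-1 : Int)^i * ((matrix.getD (n - (c0 :: rest).length) []).getD ((c0 :: rest).getD i 0) 0)
          * matDetSF matrix mod n fuel ((c0 :: rest).eraseIdx i))).sum) mod

def matDetS (matrix : List (List Int)) (mod : Int) (n : Nat) (cols : List Nat) : Int :=
  matDetSF matrix mod n cols.length cols

lemma pymod_fmod (a m : Int) : PySem.Int.mod a m = Int.fmod a m := by
  simp [PySem.Int.mod]

lemma pymod_congr {m a b : Int} (h : a % m = b % m) : PySem.Int.mod a m = PySem.Int.mod b m := by
  rw [pymod_fmod, pymod_fmod, Int.fmod_eq_emod, Int.fmod_eq_emod, h]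
  have hd : m ∣ a ↔ m ∣ b := by
    rw [Int.dvd_iff_emod_eq_zero, Int.dvd_iff_emod_eq_zero, h]
  by_cases h0 : 0 ≤ m ∨ m ∣ a
  · rw [if_pos h0, if_pos (by tauto)]
  · rw [if_neg h0, if_neg (by tauto)]

lemma pymod_emod (a m : Int) : (PySem.Int.mod a m) % m = a % m := by
  rw [pymod_fmod, Int.fmod_eq_emod]
  split_ifs with h <;> simp

lemma getD_takeDrop (row : List Int) (i j : Nat) (d : Int) :
    (row.take i ++ row.drop (i+1)).getD j d = row.getD (if j < i then j else j+1) d := by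
  induction row generalizing i j with
  | nil => simp [List.getD]
  | cons x xs ih =>
    cases i with
    | zero => simp [List.getD]
    | succ i' =>
      cases j with
      | zero => simp [List.getD]
      | succ j' =>
        simp only [List.take_succ_cons, List.drop_succ_cons, List.cons_append,
          List.getD_cons_succ, ih]
        by_cases h : j' < i' <;> simp [h, List.getD]

lemma getD_eraseIdx (l : List Nat) (i j : Nat) (d : Nat) :
    (l.eraseIdx i).getD j d = l.getD (if j < i then j else j+1) d := by
  induction l generalizing i j with
  | nil => simp [List.getD]
  | cons x xs ih =>
    cases i with
    | zero => simp [List.getD]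
    | succ i' =>
      cases j with
      | zero => simp [List.getD]
      | succ j' =>
        simp only [List.eraseIdx_cons_succ, List.getD_cons_succ, ih]
        by_cases h : j' < i' <;> simp [h, List.getD]

lemma matDetSF_nil (matrix : List (List Int)) (mod : Int) (n fuel : Nat) :
    matDetSF matrix mod n fuel [] = PySem.Int.mod 1 mod := by
  cases fuel <;> rfl

lemma matDetSF_mono (matrix : List (List Int)) (mod : Int) (n : Nat) :
    ∀ fuel fuel' (cols : List Nat), cols.length ≤ fuel → cols.length ≤ fuel' →
      matDetSF matrix mod n fuel cols = matDetSF matrix mod n fuel' cols := by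
  intro fuel
  induction fuel with
  | zero =>
    intro fuel' cols h h'
    match cols with
    | [] => rw [matDetSF_nil, matDetSF_nil]
    | _ :: _ => simp at h
  | succ f ih =>
    intro fuel' cols h h'
    match cols, fuel' with
    | [], _ => rw [matDetSF_nil, matDetSF_nil]
    | _ :: _, 0 => simp at h'
    | c0 :: rest, f' + 1 =>
      simp only [matDetSF]
      congr 1
      refine congrArg List.sum (List.map_congr_left ?_)
      intro i hi
      simp only [List.mem_range] at hi
      simp only [List.length_cons] at h h'
      have hlen : ((c0 :: rest).eraseIdx i).length = rest.length := by
        rw [List.length_eraseIdx, if_pos hi]; simp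
      congr 1
      apply ih
      · rw [hlen]; omega
      · rw [hlen]; omega

lemma mul_pymod_one (x m : Int) : (x * PySem.Int.mod 1 m) % m = x % m := by
  rw [Int.mul_emod, pymod_emod, ← Int.mul_emod, mul_one]

lemma pySign_pow (c : Nat) : (if c % 2 = 1 then (-1 : Int) else 1) = (-1 : Int)^c := by
  rcases Nat.even_or_odd c with h | h
  · rw [h.neg_one_pow]
    have : c % 2 = 0 := Nat.even_iff.mp h
    simp [this]
  · rw [h.neg_one_pow]
    have : c % 2 = 1 := Nat.odd_iff.mp h
    simp [this]

lemma matDetS_cons (matrix : List (List Int)) (mod : Int) (n : Nat) (c0 : Nat) (rest : List Nat) :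
    matDetS matrix mod n (c0 :: rest) =
      PySem.Int.mod
        (((List.range (c0 :: rest).length).map (fun i =>
          (-1 : Int)^i * ((matrix.getD (n - (c0 :: rest).length) []).getD ((c0 :: rest).getD i 0) 0)
            * matDetS matrix mod n ((c0 :: rest).eraseIdx i))).sum) mod := by
  show matDetSF matrix mod n (rest.length + 1) (c0 :: rest) = _
  simp only [matDetSF]
  congr 1
  refine congrArg List.sum (List.map_congr_left ?_)
  intro i hi
  simp only [List.mem_range, List.length_cons] at hi
  have hlen : ((c0 :: rest).eraseIdx i).length = rest.length := by
    rw [List.length_eraseIdx, if_pos (by simpa using hi)]; simp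
  congr 1
  exact matDetSF_mono matrix mod n rest.length ((c0 :: rest).eraseIdx i).length _ (by omega) (le_refl _)

lemma matDetS_single (matrix : List (List Int)) (mod : Int) (n : Nat) (c : Nat) :
    matDetS matrix mod n [c] =
      PySem.Int.mod ((matrix.getD (n - 1) []).getD c 0 * PySem.Int.mod 1 mod) mod := by
  rw [matDetS_cons]
  simp only [List.length_cons, List.length_nil, Nat.zero_add, List.range_one, List.map_cons,
    List.map_nil, List.sum_cons, List.sum_nil, pow_zero, one_mul, List.eraseIdx_cons_zero,
    List.getD_cons_zero, add_zero]
  rw [show matDetS matrix mod n [] = PySem.Int.mod 1 mod from rfl]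

lemma matDetS_single_mod (matrix : List (List Int)) (mod : Int) (n : Nat) (c : Nat) :
    matDetS matrix mod n [c] % mod = (matrix.getD (n - 1) []).getD c 0 % mod := by
  rw [matDetS_single, pymod_emod, mul_pymod_one]

-- A-side: the cofactor recursion on an explicit submatrix computes matDetS
lemma matA_eq_detS (matrix : List (List Int)) (moD : Int) (n : Nat) :
    ∀ k (M : List (List Int)) (cols : List Nat),
      cols.length = k → M.length = k → 1 ≤ k → k ≤ n →
      (∀ i j, i < k → j < k →
        (M.getD i []).getD j 0 = (matrix.getD (n - k + i) []).getD (cols.getD j 0) 0) →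
      mat_det_py M moD = matDetS matrix moD n cols := by
  intro k
  induction k using Nat.strong_induction_on with
  | _ k ih =>
  intro M cols hc hm hk1 hkn H
  cases M with
  | nil => simp at hm; omega
  | cons r0 Ms =>
  cases cols with
  | nil => simp at hc; omega
  | cons c0 cs =>
  simp only [List.length_cons] at hc hm
  by_cases h1 : k = 1
  · -- 1 × 1 block
    subst h1
    have hMs : Ms = [] := List.eq_nil_of_length_eq_zero (by omega)
    have hcs : cs = [] := List.eq_nil_of_length_eq_zero (by omega)
    subst hMs; subst hcs
    rw [mat_det_py.eq_def, matDetS_cons]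
    have hD : matDetS matrix moD n [] = PySem.Int.mod 1 moD := matDetSF_nil matrix moD n 0
    have h00 := H 0 0 (by omega) (by omega)
    simp only [List.getD_cons_zero] at h00
    simp only [List.length_cons, List.length_nil, Nat.zero_add, reduceIte, List.range_one,
      List.map_cons, List.map_nil, List.sum_cons, List.sum_nil, pow_zero, one_mul,
      List.eraseIdx_cons_zero, List.getD_cons_zero, add_zero, hD]
    apply pymod_congr
    rw [mul_pymod_one, h00]
    norm_num
  · by_cases h2 : k = 2
    · -- 2 × 2 block
      subst h2
      obtain ⟨r1, hMs⟩ : ∃ r1, Ms = [r1] := by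
        cases Ms with
        | nil => simp at hm
        | cons a t =>
          cases t with
          | nil => exact ⟨a, rfl⟩
          | cons b t' => simp at hm
      obtain ⟨c1, hcs⟩ : ∃ c1, cs = [c1] := by
        cases cs with
        | nil => simp at hc
        | cons a t =>
          cases t with
          | nil => exact ⟨a, rfl⟩
          | cons b t' => simp at hc
      subst hMs; subst hcs
      rw [mat_det_py.eq_def, matDetS_cons]
      simp only [List.length_cons, List.length_nil, Nat.zero_add, Nat.reduceAdd, reduceIte,
        show List.range 2 = [0, 1] from rfl, List.map_cons, List.map_nil, List.sum_cons,
        List.sum_nil, pow_zero, pow_one, one_mul, neg_mul, List.eraseIdx_cons_zero,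
        List.eraseIdx_cons_succ, List.getD_cons_zero, List.getD_cons_succ, add_zero]
      have a00 := H 0 0 (by omega) (by omega)
      have a01 := H 0 1 (by omega) (by omega)
      have a10 := H 1 0 (by omega) (by omega)
      have a11 := H 1 1 (by omega) (by omega)
      simp only [List.getD_cons_zero, List.getD_cons_succ] at a00 a01 a10 a11
      have hoff : n - 2 + 1 = n - 1 := by omega
      have hoff0 : n - 2 + 0 = n - 2 := by omega
      rw [hoff] at a10 a11
      rw [hoff0] at a00 a01
      apply pymod_congr
      rw [a00, a01, a10, a11]
      have m1 := matDetS_single_mod matrix moD n c1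
      have m0 := matDetS_single_mod matrix moD n c0
      have t1 : ((matrix.getD (n - 2) []).getD c0 0 * matDetS matrix moD n [c1]) % moD
          = ((matrix.getD (n - 2) []).getD c0 0 * (matrix.getD (n - 1) []).getD c1 0) % moD := by
        rw [Int.mul_emod, m1, ← Int.mul_emod]
      have t0 : ((matrix.getD (n - 2) []).getD c1 0 * matDetS matrix moD n [c0]) % moD
          = ((matrix.getD (n - 2) []).getD c1 0 * (matrix.getD (n - 1) []).getD c0 0) % moD := by
        rw [Int.mul_emod, m0, ← Int.mul_emod]
      rw [← sub_eq_add_neg]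
      conv_rhs => rw [Int.sub_emod, t1, t0]
      rw [← Int.sub_emod]
    · -- k ≥ 3 : the general expansion
      have hk3 : 3 ≤ k := by omega
      rw [mat_det_py.eq_def]
      dsimp only
      rw [if_neg (by omega), if_neg (by omega), PySem.List.foldl_add, zero_add, matDetS_cons]
      simp only [List.length_cons]
      rw [hm, hc]
      apply congrArg (fun z => PySem.Int.mod z moD)
      apply congrArg List.sum
      apply List.map_congr_left
      intro c hcmem
      simp only [List.mem_range] at hcmem
      rw [pySign_pow]
      have h0c := H 0 c (by omega) hcmem
      simp only [List.getD_cons_zero, Nat.add_zero] at h0c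
      have hrec : mat_det_py (Ms.map (fun row => row.take c ++ row.drop (c+1))) moD
          = matDetS matrix moD n ((c0 :: cs).eraseIdx c) := by
        apply ih (k-1) (by omega)
        · rw [List.length_eraseIdx, if_pos (by simp; omega)]
          simp; omega
        · simp; omega
        · omega
        · omega
        · intro a b ha hb
          have haM : a < Ms.length := by omega
          have hmap : (Ms.map (fun row => row.take c ++ row.drop (c+1))).getD a []
              = (Ms.getD a []).take c ++ (Ms.getD a []).drop (c+1) := by
            rw [List.getD_eq_getElem?_getD, List.getD_eq_getElem?_getD, List.getElem?_map,
              List.getElem?_eq_getElem haM]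
            simp
          rw [hmap, getD_takeDrop, getD_eraseIdx]
          have hH := H (a+1) (if b < c then b else b+1) (by omega) (by split_ifs <;> omega)
          simp only [List.getD_cons_succ] at hH
          rw [hH, show n - k + (a+1) = n - (k-1) + a from by omega]
      rw [hrec, h0c]

-- B-side: memo invariant
def MemoInv (matrix : List (List Int)) (mod : Int) (n : Nat)
    (memo : PySem.Dict (List Nat) Int) : Prop :=
  ∀ cs v, memo.get? cs = some v → v = matDetS matrix mod n cs

lemma matB_loop (matrix : List (List Int)) (moD : Int) (n : Nat) (row : List Int) (k : Nat)
    (ihC : ∀ (cols' : List Nat) (memo' : PySem.Dict (List Nat) Int), cols'.length < k →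
      MemoInv matrix moD n memo' →
      (matDetCols matrix n moD cols' memo').1 = matDetS matrix moD n cols' ∧
      MemoInv matrix moD n (matDetCols matrix n moD cols' memo').2) :
    ∀ (post pre : List Nat) (sign acc : Int) (memo : PySem.Dict (List Nat) Int),
      pre.length + post.length ≤ k → MemoInv matrix moD n memo →
      (matDetLoop matrix n moD row pre post sign acc memo).1
        = acc + ((List.range post.length).map (fun j =>
            sign * (-1 : Int)^j * row.getD (post.getD j 0) 0
              * matDetS matrix moD n (pre ++ post.eraseIdx j))).sum ∧
      MemoInv matrix moD n (matDetLoop matrix n moD row pre post sign acc memo).2 := by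
  intro post
  induction post with
  | nil =>
    intro pre sign acc memo hlen hinv
    rw [matDetLoop.eq_def]
    exact ⟨by simp, hinv⟩
  | cons c rest ih =>
    intro pre sign acc memo hlen hinv
    obtain ⟨hv, hinv1⟩ := ihC (pre ++ rest) memo (by simp at hlen ⊢; omega) hinv
    rw [matDetLoop.eq_def]
    dsimp only
    obtain ⟨hloop, hinv2⟩ := ih (pre ++ [c]) (-sign)
      (acc + sign * row.getD c 0 * (matDetCols matrix n moD (pre ++ rest) memo).1)
      (matDetCols matrix n moD (pre ++ rest) memo).2
      (by simp at hlen ⊢; omega) hinv1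
    refine ⟨?_, hinv2⟩
    rw [hloop, hv]
    rw [List.length_cons, List.range_succ_eq_map, List.map_cons, List.map_map, List.sum_cons]
    simp only [pow_zero, mul_one, List.getD_cons_zero, List.eraseIdx_cons_zero]
    rw [add_assoc]
    congr 1
    congr 1
    refine congrArg List.sum (List.map_congr_left ?_)
    intro j hj
    simp only [Function.comp_apply, List.getD_cons_succ, List.eraseIdx_cons_succ]
    rw [List.append_assoc, List.singleton_append, pow_succ]
    ring

lemma matB_main (matrix : List (List Int)) (moD : Int) (n : Nat) :
    ∀ k (cols : List Nat) (memo : PySem.Dict (List Nat) Int), cols.length ≤ k →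
      MemoInv matrix moD n memo →
      (matDetCols matrix n moD cols memo).1 = matDetS matrix moD n cols ∧
      MemoInv matrix moD n (matDetCols matrix n moD cols memo).2 := by
  intro k
  induction k using Nat.strong_induction_on with
  | _ k ih =>
  intro cols memo hlen hinv
  rw [matDetCols.eq_def]
  by_cases hnil : cols = []
  · subst hnil
    rw [if_pos rfl]
    exact ⟨rfl, hinv⟩
  · rw [if_neg hnil]
    cases hget : memo.get? cols with
    | some v =>
      exact ⟨(hinv _ _ hget).symm ▸ rfl, hinv⟩
    | none =>
      dsimp only
      have ihC : ∀ (cols' : List Nat) (memo' : PySem.Dict (List Nat) Int), cols'.length < k →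
          MemoInv matrix moD n memo' →
          (matDetCols matrix n moD cols' memo').1 = matDetS matrix moD n cols' ∧
          MemoInv matrix moD n (matDetCols matrix n moD cols' memo').2 := by
        intro cols' memo' h hi
        exact ih cols'.length h cols' memo' (le_refl _) hi
      obtain ⟨c0, cs, rfl⟩ : ∃ c0 cs, cols = c0 :: cs := by
        cases cols with
        | nil => exact absurd rfl hnil
        | cons a t => exact ⟨a, t, rfl⟩
      obtain ⟨hloop, hinv2⟩ := matB_loop matrix moD n
        (matrix.getD (n - (c0 :: cs).length) []) k ihC (c0 :: cs) [] 1 0 memo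
        (by simpa using hlen) hinv
      have hres : PySem.Int.mod (matDetLoop matrix n moD
          (matrix.getD (n - (c0 :: cs).length) []) [] (c0 :: cs) 1 0 memo).1 moD
          = matDetS matrix moD n (c0 :: cs) := by
        rw [hloop, matDetS_cons]
        simp only [one_mul, zero_add, List.nil_append]
      refine ⟨hres, ?_⟩
      intro cs' v hv'
      by_cases he : cs' = c0 :: cs
      · subst he
        rw [PySem.Dict.get?_insert_self] at hv'
        cases hv'
        exact hres
      · rw [PySem.Dict.get?_insert_of_ne] at hv'
        · exact hinv2 _ _ hv'
        · exact he

lemma memoInv_empty (matrix : List (List Int)) (moD : Int) (n : Nat) :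
    MemoInv matrix moD n PySem.Dict.empty := by
  intro cs v h
  simp [PySem.Dict.empty, PySem.Dict.get?] at h

lemma matB_top (matrix : List (List Int)) (moD : Int) :
    mat_det_py_alt matrix moD = matDetS matrix moD matrix.length (List.range matrix.length) := by
  unfold mat_det_py_alt
  exact (matB_main matrix moD matrix.length matrix.length (List.range matrix.length)
    PySem.Dict.empty (by simp) (memoInv_empty matrix moD matrix.length)).1

lemma alt_nil (moD : Int) : mat_det_py_alt [] moD = PySem.Int.mod 1 moD := by
  unfold mat_det_py_alt
  rw [matDetCols.eq_def]
  simp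

-- ===== VERDICT (by name: the statement is the Claim_ definition above) =====
theorem mat_det_py_spec : Claim_unchanged_mat_det_py := by
  intro matrix moD hdom hpre
  unfold Spec_mat_det_py
  intro hnd
  cases matrix with
  | nil =>
    rw [mat_det_py.eq_def, alt_nil]
    by_cases hm1 : moD = 1
    · subst hm1; decide
    by_cases hm2 : moD = -1
    · subst hm2; decide
    exact absurd ⟨rfl, hm1, hm2⟩ hnd
  | cons r0 rest =>
    rw [matB_top]
    apply matA_eq_detS (r0 :: rest) moD (r0 :: rest).length (r0 :: rest).length
    · simp
    · rfl
    · simp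
    · rfl
    · intro i j hi hj
      have hr : (List.range (r0 :: rest).length).getD j 0 = j := by
        rw [List.getD_eq_getElem _ _ (by simpa using hj), List.getElem_range]
      rw [Nat.sub_self, Nat.zero_add, hr]

theorem mat_det_py_changed : Claim_changed_mat_det_py := by
  unfold Claim_changed_mat_det_py
  refine ⟨by decide, by decide, by decide, ?_, ?_, by decide⟩
  · show mat_det_py [] 5 = 0
    rw [mat_det_py.eq_def]; decide
  · show mat_det_py_alt [] 5 = 1
    unfold mat_det_py_alt
    rw [matDetCols.eq_def]; decide

theorem mat_det_py_tight : Claim_exact_mat_det_py := by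
  intro matrix moD hdom hpre hD
  obtain ⟨rfl, h1, h2⟩ := hD
  rw [mat_det_py.eq_def, alt_nil]
  intro h
  have h0 : PySem.Int.mod 0 moD = 0 := by rw [pymod_fmod, Int.zero_fmod]
  rw [h0] at h
  have : moD ∣ 1 := (PySem.Int.mod_eq_zero_iff_dvd 1 moD).mp h.symm
  rcases Int.isUnit_iff.mp (isUnit_of_dvd_one this) with h' | h'
  · exact h1 h'
  · exact h2 h'
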